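-- pv_equiv track=rewrite | github.com/BBSISK/mathappR15Dev | generate_jc_descriptive_statistics_v2.py | generate_back_to_back_stem_leaf_svg
-- ===== SOURCE A (Python) =====
-- def generate_back_to_back_stem_leaf_svg(data_left, data_right, title_left="", title_right=""):
--     """Generate back-to-back stem-and-leaf diagram"""
--     # Organize both datasets
--     all_data = data_left + data_right
--     min_stem = min(d // 10 for d in all_data)
--     max_stem = max(d // 10 for d in all_data)
--
--     stems_left = {s: [] for s in range(min_stem, max_stem + 1)}
--     stems_right = {s: [] for s in range(min_stem, max_stem + 1)}
--
--     for val in data_left: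
--         stems_left[val // 10].append(val % 10)
--     for val in data_right:
--         stems_right[val // 10].append(val % 10)
--
--     width = 300  # Wider for better readability
--     row_height = 24
--     num_stems = max_stem - min_stem + 1
--     height = 90 + num_stems * row_height
--
--     svg = f'<svg viewBox="0 0 {width} {height}" width="{width}" xmlns="http://www.w3.org/2000/svg">'
--     svg += f'<rect width="{width}" height="{height}" fill="#ffffff"/>'
--
--     # Titles
--     if title_left:
--         svg += f'<text x="75" y="20" text-anchor="middle" font-size="11" font-weight="bold" fill="#1e293b">{title_left}</text>'
--     if title_right:
--         svg += f'<text x="225" y="20" text-anchor="middle" font-size="11" font-weight="bold" fill="#1e293b">{title_right}</text>'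
--
--     # Column headers
--     svg += f'<text x="75" y="48" text-anchor="middle" font-size="10" fill="#64748b">Leaf</text>'
--     svg += f'<text x="150" y="48" text-anchor="middle" font-size="10" fill="#64748b">Stem</text>'
--     svg += f'<text x="225" y="48" text-anchor="middle" font-size="10" fill="#64748b">Leaf</text>'
--
--     # Dividing lines
--     svg += f'<line x1="130" y1="38" x2="130" y2="{height-20}" stroke="#94a3b8" stroke-width="1"/>'
--     svg += f'<line x1="170" y1="38" x2="170" y2="{height-20}" stroke="#94a3b8" stroke-width="1"/>'
--
--     # Data rows
--     for i, stem in enumerate(range(min_stem, max_stem + 1)):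
--         y = 70 + i * row_height
--
--         # Left leaves (reversed order, right-aligned)
--         left_leaves = ' '.join(str(l) for l in sorted(stems_left[stem], reverse=True))
--         svg += f'<text x="125" y="{y}" text-anchor="end" font-size="12" fill="#3b82f6" font-family="monospace">{left_leaves}</text>'
--
--         # Stem
--         svg += f'<text x="150" y="{y}" text-anchor="middle" font-size="12" font-weight="bold" fill="#1e293b">{stem}</text>'
--
--         # Right leaves
--         right_leaves = ' '.join(str(l) for l in sorted(stems_right[stem]))
--         svg += f'<text x="175" y="{y}" font-size="12" fill="#22c55e" font-family="monospace">{right_leaves}</text>'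
--
--     # Key
--     svg += f'<text x="10" y="{height-5}" font-size="9" fill="#64748b">Key: 5 3|4 means 35 (left) and 34 (right)</text>'
--
--     svg += '</svg>'
--     return svg
-- ===== SOURCE B (Python) =====
-- def generate_back_to_back_stem_leaf_svg(data_left, data_right, title_left="", title_right=""):
--     """Generate back-to-back stem-and-leaf diagram (dict-free: per-stem scans, joined parts)."""
--     stems = [d // 10 for d in data_left + data_right]
--     min_stem = min(stems)
--     max_stem = max(stems)
--
--     width = 300
--     row_height = 24
--     height = 90 + (max_stem - min_stem + 1) * row_height
--
--     def row(i, stem):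
--         y = 70 + i * row_height
--         left_leaves = ' '.join(str(l) for l in sorted((v % 10 for v in data_left if v // 10 == stem), reverse=True))
--         right_leaves = ' '.join(str(l) for l in sorted(v % 10 for v in data_right if v // 10 == stem))
--         return (f'<text x="125" y="{y}" text-anchor="end" font-size="12" fill="#3b82f6" font-family="monospace">{left_leaves}</text>'
--                 f'<text x="150" y="{y}" text-anchor="middle" font-size="12" font-weight="bold" fill="#1e293b">{stem}</text>'
--                 f'<text x="175" y="{y}" font-size="12" fill="#22c55e" font-family="monospace">{right_leaves}</text>')
--
--     parts = [f'<svg viewBox="0 0 {width} {height}" width="{width}" xmlns="http://www.w3.org/2000/svg">',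
--              f'<rect width="{width}" height="{height}" fill="#ffffff"/>']
--     if title_left:
--         parts.append(f'<text x="75" y="20" text-anchor="middle" font-size="11" font-weight="bold" fill="#1e293b">{title_left}</text>')
--     if title_right:
--         parts.append(f'<text x="225" y="20" text-anchor="middle" font-size="11" font-weight="bold" fill="#1e293b">{title_right}</text>')
--     parts += [f'<text x="75" y="48" text-anchor="middle" font-size="10" fill="#64748b">Leaf</text>',
--               f'<text x="150" y="48" text-anchor="middle" font-size="10" fill="#64748b">Stem</text>',
--               f'<text x="225" y="48" text-anchor="middle" font-size="10" fill="#64748b">Leaf</text>',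
--               f'<line x1="130" y1="38" x2="130" y2="{height-20}" stroke="#94a3b8" stroke-width="1"/>',
--               f'<line x1="170" y1="38" x2="170" y2="{height-20}" stroke="#94a3b8" stroke-width="1"/>']
--     parts += [row(i, stem) for i, stem in enumerate(range(min_stem, max_stem + 1))]
--     parts.append(f'<text x="10" y="{height-5}" font-size="9" fill="#64748b">Key: 5 3|4 means 35 (left) and 34 (right)</text>')
--     parts.append('</svg>')
--     return ''.join(parts)
-- ===== Notes on version B (the rewrite author's own statement) =====
-- stated objective: simpler
-- what changed: B drops A's two pre-built per-stem dicts and their populate loops entirely: it scans the raw data once per stem with a filter comprehension, and assembles the SVG by joining a parts list instead of repeated string concatenation into an accumulator.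
import Mathlib
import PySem

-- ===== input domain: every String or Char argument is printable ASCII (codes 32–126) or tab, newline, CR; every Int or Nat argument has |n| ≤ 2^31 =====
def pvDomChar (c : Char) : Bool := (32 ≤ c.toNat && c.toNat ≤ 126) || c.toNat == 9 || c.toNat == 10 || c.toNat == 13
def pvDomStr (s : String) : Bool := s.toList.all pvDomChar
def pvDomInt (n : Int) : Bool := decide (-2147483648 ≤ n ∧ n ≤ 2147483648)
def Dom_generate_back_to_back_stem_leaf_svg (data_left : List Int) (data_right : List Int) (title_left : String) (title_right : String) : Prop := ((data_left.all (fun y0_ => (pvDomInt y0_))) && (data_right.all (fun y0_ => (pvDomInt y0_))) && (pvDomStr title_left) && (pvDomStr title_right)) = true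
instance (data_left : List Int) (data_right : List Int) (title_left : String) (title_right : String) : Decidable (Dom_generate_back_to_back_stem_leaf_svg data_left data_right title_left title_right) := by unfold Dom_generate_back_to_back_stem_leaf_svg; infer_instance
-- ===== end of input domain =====

-- B replaces A's two pre-built stem dicts by per-stem scans of the raw data and joins a parts list;
-- objective: simpler (dict-free). Equal return value on all inputs where A returns (nonempty combined data).

-- ===== PORT A =====
def generate_back_to_back_stem_leaf_svg (data_left : List Int) (data_right : List Int) (title_left : String) (title_right : String) : String :=
  let all_data := data_left ++ data_right
  match PySem.List.min? (all_data.map (fun d => PySem.Int.floordiv d 10)) (fun x => x),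
        PySem.List.max? (all_data.map (fun d => PySem.Int.floordiv d 10)) (fun x => x) with
  | some min_stem, some max_stem =>
    let stems_left0 : PySem.Dict Int (List Int) :=
      (PySem.List.pyRange min_stem (max_stem + 1) 1).foldl (fun d s => d.insert s ([] : List Int)) PySem.Dict.empty
    let stems_right0 : PySem.Dict Int (List Int) :=
      (PySem.List.pyRange min_stem (max_stem + 1) 1).foldl (fun d s => d.insert s ([] : List Int)) PySem.Dict.empty
    let stems_left := data_left.foldl
      (fun d val => d.modify (PySem.Int.floordiv val 10) [] (fun l => l ++ [PySem.Int.mod val 10])) stems_left0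
    let stems_right := data_right.foldl
      (fun d val => d.modify (PySem.Int.floordiv val 10) [] (fun l => l ++ [PySem.Int.mod val 10])) stems_right0
    let width : Int := 300
    let row_height : Int := 24
    let num_stems := max_stem - min_stem + 1
    let height := 90 + num_stems * row_height
    let svg := "<svg viewBox=\"0 0 " ++ PySem.Int.toStr width ++ " " ++ PySem.Int.toStr height ++ "\" width=\"" ++ PySem.Int.toStr width ++ "\" xmlns=\"http://www.w3.org/2000/svg\">"
    let svg := svg ++ ("<rect width=\"" ++ PySem.Int.toStr width ++ "\" height=\"" ++ PySem.Int.toStr height ++ "\" fill=\"#ffffff\"/>")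
    let svg := if title_left = "" then svg else
      svg ++ ("<text x=\"75\" y=\"20\" text-anchor=\"middle\" font-size=\"11\" font-weight=\"bold\" fill=\"#1e293b\">" ++ title_left ++ "</text>")
    let svg := if title_right = "" then svg else
      svg ++ ("<text x=\"225\" y=\"20\" text-anchor=\"middle\" font-size=\"11\" font-weight=\"bold\" fill=\"#1e293b\">" ++ title_right ++ "</text>")
    let svg := svg ++ "<text x=\"75\" y=\"48\" text-anchor=\"middle\" font-size=\"10\" fill=\"#64748b\">Leaf</text>"
    let svg := svg ++ "<text x=\"150\" y=\"48\" text-anchor=\"middle\" font-size=\"10\" fill=\"#64748b\">Stem</text>"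
    let svg := svg ++ "<text x=\"225\" y=\"48\" text-anchor=\"middle\" font-size=\"10\" fill=\"#64748b\">Leaf</text>"
    let svg := svg ++ ("<line x1=\"130\" y1=\"38\" x2=\"130\" y2=\"" ++ PySem.Int.toStr (height - 20) ++ "\" stroke=\"#94a3b8\" stroke-width=\"1\"/>")
    let svg := svg ++ ("<line x1=\"170\" y1=\"38\" x2=\"170\" y2=\"" ++ PySem.Int.toStr (height - 20) ++ "\" stroke=\"#94a3b8\" stroke-width=\"1\"/>")
    let svg := (PySem.List.enumerate (PySem.List.pyRange min_stem (max_stem + 1) 1) 0).foldl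
      (fun svg p =>
        let y := 70 + p.1 * row_height
        let left_leaves := PySem.Str.join " " ((PySem.List.sorted (stems_left.getD p.2 []) (fun x => x) true).map (fun l => PySem.Int.toStr l))
        let svg := svg ++ ("<text x=\"125\" y=\"" ++ PySem.Int.toStr y ++ "\" text-anchor=\"end\" font-size=\"12\" fill=\"#3b82f6\" font-family=\"monospace\">" ++ left_leaves ++ "</text>")
        let svg := svg ++ ("<text x=\"150\" y=\"" ++ PySem.Int.toStr y ++ "\" text-anchor=\"middle\" font-size=\"12\" font-weight=\"bold\" fill=\"#1e293b\">" ++ PySem.Int.toStr p.2 ++ "</text>")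
        let right_leaves := PySem.Str.join " " ((PySem.List.sorted (stems_right.getD p.2 []) (fun x => x) false).map (fun l => PySem.Int.toStr l))
        svg ++ ("<text x=\"175\" y=\"" ++ PySem.Int.toStr y ++ "\" font-size=\"12\" fill=\"#22c55e\" font-family=\"monospace\">" ++ right_leaves ++ "</text>")) svg
    let svg := svg ++ ("<text x=\"10\" y=\"" ++ PySem.Int.toStr (height - 5) ++ "\" font-size=\"9\" fill=\"#64748b\">Key: 5 3|4 means 35 (left) and 34 (right)</text>")
    svg ++ "</svg>"
  | _, _ => ""

-- ===== PORT B =====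
def generate_back_to_back_stem_leaf_svg_alt (data_left : List Int) (data_right : List Int) (title_left : String) (title_right : String) : String :=
  let stems := (data_left ++ data_right).map (fun d => PySem.Int.floordiv d 10)
  match PySem.List.min? stems (fun x => x) with
  | none => ""
  | some min_stem =>
   match PySem.List.max? stems (fun x => x) with
   | none => ""
   | some max_stem =>
    let width : Int := 300
    let row_height : Int := 24
    let height := 90 + (max_stem - min_stem + 1) * row_height
    let row := fun (p : Int × Int) =>
      let y := 70 + p.1 * row_height
      let left_leaves := PySem.Str.join " " ((PySem.List.sorted ((data_left.filter (fun v => PySem.Int.floordiv v 10 == p.2)).map (fun v => PySem.Int.mod v 10)) (fun x => x) true).map (fun l => PySem.Int.toStr l))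
      let right_leaves := PySem.Str.join " " ((PySem.List.sorted ((data_right.filter (fun v => PySem.Int.floordiv v 10 == p.2)).map (fun v => PySem.Int.mod v 10)) (fun x => x) false).map (fun l => PySem.Int.toStr l))
      ("<text x=\"125\" y=\"" ++ PySem.Int.toStr y ++ "\" text-anchor=\"end\" font-size=\"12\" fill=\"#3b82f6\" font-family=\"monospace\">" ++ left_leaves ++ "</text>") ++
      ("<text x=\"150\" y=\"" ++ PySem.Int.toStr y ++ "\" text-anchor=\"middle\" font-size=\"12\" font-weight=\"bold\" fill=\"#1e293b\">" ++ PySem.Int.toStr p.2 ++ "</text>") ++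
      ("<text x=\"175\" y=\"" ++ PySem.Int.toStr y ++ "\" font-size=\"12\" fill=\"#22c55e\" font-family=\"monospace\">" ++ right_leaves ++ "</text>")
    let parts : List String :=
      ["<svg viewBox=\"0 0 " ++ PySem.Int.toStr width ++ " " ++ PySem.Int.toStr height ++ "\" width=\"" ++ PySem.Int.toStr width ++ "\" xmlns=\"http://www.w3.org/2000/svg\">",
       "<rect width=\"" ++ PySem.Int.toStr width ++ "\" height=\"" ++ PySem.Int.toStr height ++ "\" fill=\"#ffffff\"/>"]
    let parts := if title_left = "" then parts else
      parts ++ ["<text x=\"75\" y=\"20\" text-anchor=\"middle\" font-size=\"11\" font-weight=\"bold\" fill=\"#1e293b\">" ++ title_left ++ "</text>"]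
    let parts := if title_right = "" then parts else
      parts ++ ["<text x=\"225\" y=\"20\" text-anchor=\"middle\" font-size=\"11\" font-weight=\"bold\" fill=\"#1e293b\">" ++ title_right ++ "</text>"]
    let parts := parts ++
      ["<text x=\"75\" y=\"48\" text-anchor=\"middle\" font-size=\"10\" fill=\"#64748b\">Leaf</text>",
       "<text x=\"150\" y=\"48\" text-anchor=\"middle\" font-size=\"10\" fill=\"#64748b\">Stem</text>",
       "<text x=\"225\" y=\"48\" text-anchor=\"middle\" font-size=\"10\" fill=\"#64748b\">Leaf</text>",
       "<line x1=\"130\" y1=\"38\" x2=\"130\" y2=\"" ++ PySem.Int.toStr (height - 20) ++ "\" stroke=\"#94a3b8\" stroke-width=\"1\"/>",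
       "<line x1=\"170\" y1=\"38\" x2=\"170\" y2=\"" ++ PySem.Int.toStr (height - 20) ++ "\" stroke=\"#94a3b8\" stroke-width=\"1\"/>"]
    let parts := parts ++ (PySem.List.enumerate (PySem.List.pyRange min_stem (max_stem + 1) 1) 0).map row
    let parts := parts ++ ["<text x=\"10\" y=\"" ++ PySem.Int.toStr (height - 5) ++ "\" font-size=\"9\" fill=\"#64748b\">Key: 5 3|4 means 35 (left) and 34 (right)</text>"]
    let parts := parts ++ ["</svg>"]
    PySem.Str.join "" parts

-- ===== PRECONDITION & SPEC =====
-- Pre_ excludes only the empty combined dataset, on which A raises ValueError (min() of an empty sequence).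
def Pre_generate_back_to_back_stem_leaf_svg (data_left : List Int) (data_right : List Int) (title_left : String) (title_right : String) : Prop :=
  data_left ++ data_right ≠ []
instance (data_left : List Int) (data_right : List Int) (title_left : String) (title_right : String) : Decidable (Pre_generate_back_to_back_stem_leaf_svg data_left data_right title_left title_right) := by unfold Pre_generate_back_to_back_stem_leaf_svg; infer_instance

def pvWitness_generate_back_to_back_stem_leaf_svg : List Int × List Int × String × String := ([35, 31], [34], "L", "R")

def Spec_generate_back_to_back_stem_leaf_svg (data_left : List Int) (data_right : List Int) (title_left : String) (title_right : String) (out : String) : Prop := out = generate_back_to_back_stem_leaf_svg_alt data_left data_right title_left title_right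
instance (data_left : List Int) (data_right : List Int) (title_left : String) (title_right : String) (out : String) : Decidable (Spec_generate_back_to_back_stem_leaf_svg data_left data_right title_left title_right out) := by unfold Spec_generate_back_to_back_stem_leaf_svg; infer_instance

-- ===== CLAIM (what is proved, stated in full; the proofs are below) =====
def Claim_equal_generate_back_to_back_stem_leaf_svg : Prop := ∀ (data_left : List Int) (data_right : List Int) (title_left : String) (title_right : String), Dom_generate_back_to_back_stem_leaf_svg data_left data_right title_left title_right → Pre_generate_back_to_back_stem_leaf_svg data_left data_right title_left title_right → Spec_generate_back_to_back_stem_leaf_svg data_left data_right title_left title_right (generate_back_to_back_stem_leaf_svg data_left data_right title_left title_right)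

-- ===== LEMMAS AND PROOFS =====

-- ''.join on strings: nil, cons and append rules
theorem pvJoinE_nil : PySem.Str.join "" [] = "" := by
  apply String.toList_injective; simp [PySem.Str.toList_join, PySem.Chars.join_nil]

theorem pvJoinE_cons (x : String) (xs : List String) :
    PySem.Str.join "" (x :: xs) = x ++ PySem.Str.join "" xs := by
  cases xs with
  | nil =>
    apply String.toList_injective
    simp [PySem.Str.toList_join, PySem.Chars.join_singleton, PySem.Chars.join_nil]
  | cons y t =>
    apply String.toList_injective
    simp [PySem.Str.toList_join, PySem.Chars.join_cons_cons]

theorem pvJoinE_append (l1 l2 : List String) :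
    PySem.Str.join "" (l1 ++ l2) = PySem.Str.join "" l1 ++ PySem.Str.join "" l2 := by
  induction l1 with
  | nil => simp [pvJoinE_nil]
  | cons x t ih => simp [pvJoinE_cons, ih, String.append_assoc]

-- A's row-emission loop is the ''.join of the mapped rows
theorem pvRowsFold (l : List (Int × Int)) (f g h : Int × Int → String) (init : String) :
    l.foldl (fun s p => s ++ f p ++ g p ++ h p) init
      = init ++ PySem.Str.join "" (l.map (fun p => f p ++ g p ++ h p)) := by
  induction l generalizing init with
  | nil => simp [pvJoinE_nil]
  | cons x t ih =>
    rw [List.foldl_cons, ih, List.map_cons, pvJoinE_cons]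
    simp [String.append_assoc]

-- the range-initialised dict stores [] at every key
theorem pvInitGetD (rng : List Int) (d : PySem.Dict Int (List Int)) (c : Int)
    (hd : d.getD c [] = []) :
    (rng.foldl (fun d s => d.insert s ([] : List Int)) d).getD c [] = [] := by
  induction rng generalizing d with
  | nil => simpa using hd
  | cons s t ih =>
    simp only [List.foldl_cons]
    apply ih
    rw [PySem.Dict.getD_insert]
    split <;> simp [hd]

-- the bucket of any stem c is the mod-10 image of the values with floordiv 10 = c, in data order
theorem pvBucket (data rng : List Int) (c : Int) :
    ((data.foldl (fun d val => d.modify (PySem.Int.floordiv val 10) [] (fun l => l ++ [PySem.Int.mod val 10]))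
        (rng.foldl (fun d s => d.insert s ([] : List Int)) PySem.Dict.empty)).getD c [])
      = (data.filter (fun v => PySem.Int.floordiv v 10 == c)).map (fun v => PySem.Int.mod v 10) := by
  have h1 : (data.foldl (fun d val => d.modify (PySem.Int.floordiv val 10) [] (fun l => l ++ [PySem.Int.mod val 10]))
        (rng.foldl (fun d s => d.insert s ([] : List Int)) PySem.Dict.empty))
      = ((data.map (fun v => (PySem.Int.floordiv v 10, PySem.Int.mod v 10))).foldl
          (fun d p => d.modify p.1 [] (fun l => l ++ [p.2]))
          (rng.foldl (fun d s => d.insert s ([] : List Int)) PySem.Dict.empty)) := by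
    rw [List.foldl_map]
  rw [h1, PySem.Dict.getD_foldl_modify_append, pvInitGetD rng PySem.Dict.empty c (by simp [PySem.Dict.getD_empty])]
  simp [List.filter_map, Function.comp_def]

-- ===== VERDICT (by name: the statement is the Claim_ definition above) =====
theorem generate_back_to_back_stem_leaf_svg_spec : Claim_equal_generate_back_to_back_stem_leaf_svg := by
  intro dl dr tl tr _ hpre
  unfold Spec_generate_back_to_back_stem_leaf_svg
  unfold generate_back_to_back_stem_leaf_svg generate_back_to_back_stem_leaf_svg_alt
  unfold Pre_generate_back_to_back_stem_leaf_svg at hpre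
  have hne : (dl ++ dr).map (fun d => PySem.Int.floordiv d 10) ≠ [] := by
    intro h; exact hpre (List.map_eq_nil_iff.mp h)
  obtain ⟨mn, hmn⟩ : ∃ mn, PySem.List.min? ((dl ++ dr).map (fun d => PySem.Int.floordiv d 10)) (fun x => x) = some mn := by
    cases h : PySem.List.min? ((dl ++ dr).map (fun d => PySem.Int.floordiv d 10)) (fun x => x) with
    | none => exact absurd ((PySem.List.min?_eq_none_iff _ _).mp h) hne
    | some m => exact ⟨m, rfl⟩
  obtain ⟨mx, hmx⟩ : ∃ mx, PySem.List.max? ((dl ++ dr).map (fun d => PySem.Int.floordiv d 10)) (fun x => x) = some mx := by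
    cases h : PySem.List.max? ((dl ++ dr).map (fun d => PySem.Int.floordiv d 10)) (fun x => x) with
    | none =>
      exact absurd ((PySem.List.max?_eq_none_iff _ _).mp h) hne
    | some m => exact ⟨m, rfl⟩
  simp only [hmn, hmx]
  rw [pvRowsFold]
  simp only [pvBucket, pvJoinE_append, pvJoinE_cons, pvJoinE_nil, String.append_assoc, String.append_empty]
  split_ifs <;> simp [pvJoinE_cons, pvJoinE_nil, String.append_assoc, String.append_empty]
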